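-- pv_equiv track=rewrite | github.com/HarryGM/ECM1400_C2 | Stage_2/components.py | check_match_in_direction
-- ===== SOURCE A (Python) =====
-- def check_match_in_direction(board, position, direction, colour, opposing_colour):
--     """
--         Determine whether when recursing over a
--         given direction from a given position if
--         there is a matching colour stone
--     """
--
--     x = position[0]
--     y = position[1]
--
--     if board[y][x] == colour:
--         return True
--
--     # Check if moving one further and check if this takes you off the board,
--     if x + direction[0] > len(board) - 1 or x + direction[0] < 0:
--         return False
--     if y + direction[1] > len(board) - 1 or y + direction[1] < 0:
--         return False
--
--     if board[y][x] == "None ":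
--         return False
--
--     new_pos = (x + direction[0], y + direction[1])
--     return check_match_in_direction(board, new_pos, direction, colour, opposing_colour)
-- ===== SOURCE B (Python) =====
-- def check_match_in_direction(board, position, direction, colour, opposing_colour):
--     """Walk the direction, first materialising the visited cells, then scanning them."""
--     n = len(board)
--     x, y = position
--     dx, dy = direction
--     cells = []
--     while True:
--         c = board[y][x]
--         cells.append(c)
--         if c == colour or c == "None ":
--             break
--         if not (0 <= x + dx < n and 0 <= y + dy < n):
--             break
--         x += dx
--         y += dy
--     for c in cells:
--         if c == colour:
--             return True
--         if c == "None ":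
--             return False
--     return False
-- ===== Notes on version B (the rewrite author's own statement) =====
-- stated objective: alternative
-- what changed: Replaces A's recursion with a two-phase computation: an iterative loop first materialises the list of cells visited along the direction (stopping at a decisive cell or at the board edge), then a separate linear scan of that list decides True at the first matching cell and False at the first "None " cell or at the end.
-- outside the precondition, e.g. on check_match_in_direction([['B ', 'B '], []], (0, 0), (0, 1), 'B ', 'W '): A returns True, B returns True
import Mathlib
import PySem

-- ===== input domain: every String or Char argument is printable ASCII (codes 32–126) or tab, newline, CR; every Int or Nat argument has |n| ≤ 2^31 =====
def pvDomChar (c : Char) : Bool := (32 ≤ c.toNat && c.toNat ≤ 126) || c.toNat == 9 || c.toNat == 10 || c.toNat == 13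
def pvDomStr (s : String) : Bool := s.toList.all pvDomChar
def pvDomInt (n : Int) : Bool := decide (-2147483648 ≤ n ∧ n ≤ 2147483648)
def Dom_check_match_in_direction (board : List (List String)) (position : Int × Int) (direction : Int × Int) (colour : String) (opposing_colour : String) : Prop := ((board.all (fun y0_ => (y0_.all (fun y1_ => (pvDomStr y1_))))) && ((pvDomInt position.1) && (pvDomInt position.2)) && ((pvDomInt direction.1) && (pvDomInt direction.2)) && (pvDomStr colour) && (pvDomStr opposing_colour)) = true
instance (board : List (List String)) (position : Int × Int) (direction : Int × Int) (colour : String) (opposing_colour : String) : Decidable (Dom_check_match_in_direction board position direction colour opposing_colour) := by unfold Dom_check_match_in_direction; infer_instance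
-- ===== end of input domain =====

-- B replaces A's recursion by a two-phase walk: build the visited-cell list iteratively, then scan it; alternative decomposition, same cost.


-- board[y][x] (Python indexing, negative wraparound); the default "" is never hit inside Pre_
def cellAt (board : List (List String)) (x y : Int) : String :=
  (PySem.List.pyGet? ((PySem.List.pyGet? board y).getD []) x).getD ""

-- ===== PORT A =====
-- literal transliteration of A's recursion; the fuel board.length + 2 bounds the
-- recursion depth on every input admitted by Pre_ (it is never exhausted there)
def goA (board : List (List String)) (dx dy : Int) (colour : String) :
    Nat → Int → Int → Bool
  | 0, _, _ => false
  | fuel+1, x, y =>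
    if cellAt board x y = colour then true
    else if x + dx > (board.length : Int) - 1 ∨ x + dx < 0 then false
    else if y + dy > (board.length : Int) - 1 ∨ y + dy < 0 then false
    else if cellAt board x y = "None " then false
    else goA board dx dy colour fuel (x + dx) (y + dy)

def check_match_in_direction (board : List (List String)) (position : Int × Int) (direction : Int × Int) (colour : String) (opposing_colour : String) : Bool :=
  goA board direction.1 direction.2 colour (board.length + 2) position.1 position.2

-- ===== PORT B =====
-- phase 1 of Source B: the while-loop materialising the visited cells (same fuel bound)
def buildCells (board : List (List String)) (dx dy : Int) (colour : String) :
    Nat → Int → Int → List String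
  | 0, _, _ => []
  | fuel+1, x, y =>
    let c := cellAt board x y
    if c = colour ∨ c = "None " then [c]
    else if ¬ (0 ≤ x + dx ∧ x + dx < (board.length : Int) ∧
               0 ≤ y + dy ∧ y + dy < (board.length : Int)) then [c]
    else c :: buildCells board dx dy colour fuel (x + dx) (y + dy)

-- phase 2 of Source B: the for-loop scanning the cell list
def scanCells (colour : String) : List String → Bool
  | [] => false
  | c :: rest =>
    if c = colour then true
    else if c = "None " then false
    else scanCells colour rest

def check_match_in_direction_alt (board : List (List String)) (position : Int × Int) (direction : Int × Int) (colour : String) (opposing_colour : String) : Bool :=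
  scanCells colour
    (buildCells board direction.1 direction.2 colour (board.length + 2) position.1 position.2)

-- ===== PRECONDITION & SPEC =====
-- Pre_ excludes exactly the inputs where the Python raises: empty boards and invalid start
-- indices (IndexError), rays along which an on-board cell is missing from a short row
-- (IndexError somewhere on the walk; this also excludes the few such boards whose walk
-- stops early, where A still returns — see the cite), and self-loop walks (direction (0,0)
-- from a non-negative start whose cell is neither colour nor "None "), where A hits RecursionError.
def Pre_check_match_in_direction (board : List (List String)) (position : Int × Int) (direction : Int × Int) (colour : String) (opposing_colour : String) : Prop :=
  0 < board.length ∧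
  (-(board.length : Int) ≤ position.2 ∧ position.2 < (board.length : Int)) ∧
  (-((((PySem.List.pyGet? board position.2).getD []).length : Int)) ≤ position.1 ∧
    position.1 < (((PySem.List.pyGet? board position.2).getD []).length : Int)) ∧
  (∀ k ∈ Finset.Icc 1 board.length,
     (0 ≤ position.1 + direction.1 ∧ position.1 + direction.1 < (board.length : Int) ∧
      0 ≤ position.2 + direction.2 ∧ position.2 + direction.2 < (board.length : Int) ∧
      0 ≤ position.1 + (k : Int) * direction.1 ∧ position.1 + (k : Int) * direction.1 < (board.length : Int) ∧
      0 ≤ position.2 + (k : Int) * direction.2 ∧ position.2 + (k : Int) * direction.2 < (board.length : Int)) →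
     position.1 + (k : Int) * direction.1 <
       ((((PySem.List.pyGet? board (position.2 + (k : Int) * direction.2)).getD []).length : Int))) ∧
  (direction ≠ (0, 0) ∨ position.1 < 0 ∨ position.2 < 0 ∨
   cellAt board position.1 position.2 = colour ∨
   cellAt board position.1 position.2 = "None ")
instance (board : List (List String)) (position : Int × Int) (direction : Int × Int) (colour : String) (opposing_colour : String) : Decidable (Pre_check_match_in_direction board position direction colour opposing_colour) := by unfold Pre_check_match_in_direction; infer_instance

def pvWitness_check_match_in_direction : List (List String) × (Int × Int) × (Int × Int) × String × String :=
  ([["B ", "W "], ["None ", "B "]], (0, 0), (1, 1), "B ", "W ")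

def Spec_check_match_in_direction (board : List (List String)) (position : Int × Int) (direction : Int × Int) (colour : String) (opposing_colour : String) (out : Bool) : Prop := out = check_match_in_direction_alt board position direction colour opposing_colour
instance (board : List (List String)) (position : Int × Int) (direction : Int × Int) (colour : String) (opposing_colour : String) (out : Bool) : Decidable (Spec_check_match_in_direction board position direction colour opposing_colour out) := by unfold Spec_check_match_in_direction; infer_instance

-- ===== CLAIM (what is proved, stated in full; the proofs are below) =====
def Claim_equal_check_match_in_direction : Prop := ∀ (board : List (List String)) (position : Int × Int) (direction : Int × Int) (colour : String) (opposing_colour : String), Dom_check_match_in_direction board position direction colour opposing_colour → Pre_check_match_in_direction board position direction colour opposing_colour → Spec_check_match_in_direction board position direction colour opposing_colour (check_match_in_direction board position direction colour opposing_colour)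

-- ===== LEMMAS AND PROOFS =====

-- With equal fuel, A's recursion computes exactly the scan of B's materialised cell list.
theorem goA_eq_scan_build (board : List (List String)) (dx dy : Int) (colour : String) :
    ∀ (fuel : Nat) (x y : Int),
      goA board dx dy colour fuel x y =
        scanCells colour (buildCells board dx dy colour fuel x y) := by
  intro fuel
  induction fuel with
  | zero => intro x y; simp [goA, buildCells, scanCells]
  | succ n ih =>
    intro x y
    by_cases h1 : cellAt board x y = colour
    · simp [goA, buildCells, h1, scanCells]
    · by_cases h2 : cellAt board x y = "None "
      · simp [goA, buildCells, h2, scanCells]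
      · by_cases hb : (0 ≤ x + dx ∧ x + dx < (board.length : Int) ∧
                       0 ≤ y + dy ∧ y + dy < (board.length : Int))
        · have hx : ¬ ((board.length : Int) ≤ x + dx) := by omega
          have hx0 : ¬ (x + dx < 0) := by omega
          have hy : ¬ ((board.length : Int) ≤ y + dy) := by omega
          have hy0 : ¬ (y + dy < 0) := by omega
          simp [goA, buildCells, h1, h2, hb, scanCells, ih, hx, hx0, hy, hy0]
        · simp [goA, buildCells, h1, h2, hb, scanCells]
          intro ha hb2 hc hd
          exfalso; omega

-- ===== VERDICT (by name: the statement is the Claim_ definition above) =====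
theorem check_match_in_direction_spec : Claim_equal_check_match_in_direction := by
  intro board position direction colour opposing_colour _ _
  unfold Spec_check_match_in_direction check_match_in_direction check_match_in_direction_alt
  exact goA_eq_scan_build board direction.1 direction.2 colour (board.length + 2) position.1 position.2
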